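-- pv_equiv track=rewrite | github.com/prathgan/COASTL | tool/stl_processing/stl_helper_funcs.py | find_predicate
-- ===== SOURCE A (Python) =====
-- def find_predicate(string):
-- 	"""
-- 	Return logical operator of predicate expression
-- 	and index of operator
-- 	"""
-- 	operator = None
-- 	paren_count = 0
-- 	itr_index = 0
-- 	operator_ind = -1
-- 	while itr_index<len(string):
-- 		if string[itr_index]=='(':
-- 			paren_count = paren_count + 1
-- 		if string[itr_index]==')':
-- 			paren_count = paren_count - 1
-- 		if paren_count==1 and (string[itr_index]=="<" or string[itr_index]==">" or string[itr_index]=="="):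
-- 			operator_ind = itr_index
-- 			if string[itr_index+1]=="=":
-- 				operator = string[itr_index:itr_index+2]
-- 			else:
-- 				operator = string[itr_index]
-- 			return operator, operator_ind
-- 		itr_index += 1
-- 	return operator, operator_ind
-- ===== SOURCE B (Python) =====
-- def find_predicate(string):
-- 	"""
-- 	Return logical operator of predicate expression
-- 	and index of operator
-- 	"""
-- 	for i, c in enumerate(string):
-- 		if c in "<>=" and string[:i].count('(') - string[:i].count(')') == 1:
-- 			return (string[i:i+2] if string[i+1] == '=' else c), i
-- 	return None, -1
-- ===== Notes on version B (the rewrite author's own statement) =====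
-- stated objective: faster
-- what changed: B replaces A's stateful while-loop with a running paren counter by a single enumerate scan that tests each operator-character candidate against the paren depth computed as a prefix count string[:i].count('(') - string[:i].count(')'), returning on the first candidate at depth 1.
import Mathlib
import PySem

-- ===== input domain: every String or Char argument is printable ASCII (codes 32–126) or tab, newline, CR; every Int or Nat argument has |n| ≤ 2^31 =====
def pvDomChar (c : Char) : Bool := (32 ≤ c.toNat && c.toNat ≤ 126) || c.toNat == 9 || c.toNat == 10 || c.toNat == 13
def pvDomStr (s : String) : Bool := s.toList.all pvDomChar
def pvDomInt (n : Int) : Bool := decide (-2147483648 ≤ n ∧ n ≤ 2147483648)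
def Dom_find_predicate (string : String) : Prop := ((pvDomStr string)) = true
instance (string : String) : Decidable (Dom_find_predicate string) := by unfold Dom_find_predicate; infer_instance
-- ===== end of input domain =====

-- B replaces A's running paren counter by a per-candidate prefix count; same return value wherever A returns.
-- Both A and B raise IndexError when the matching operator is the last character (string[i+1]); Pre_ excludes that.

-- ===== PORT A =====
-- literal port of A's while-loop: running paren_count, index loop; on the excluded
-- crash inputs (s[i+1] out of range, Python IndexError) the port's match falls to the default arm.
def find_predicate_go (s : List Char) (paren_count : Int) (itr_index : Nat) : Option String × Int :=
  if h : itr_index < s.length then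
    let c := s[itr_index]
    let p1 := if c = '(' then paren_count + 1 else paren_count
    let p2 := if c = ')' then p1 - 1 else p1
    if p2 = 1 ∧ (c = '<' ∨ c = '>' ∨ c = '=') then
      match s[itr_index + 1]? with
      | some '=' => (some (String.ofList [c, '=']), (itr_index : Int))  -- string[i:i+2]
      | _ => (some (String.ofList [c]), (itr_index : Int))
    else find_predicate_go s p2 (itr_index + 1)
  else (none, -1)
termination_by s.length - itr_index

def find_predicate (string : String) : Option String × Int :=
  find_predicate_go string.toList 0 0

-- ===== PORT B =====
-- prefix paren balance: string[:i].count('(') - string[:i].count(')')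
def pvBal (l : List Char) : Int := (l.count '(' : Int) - (l.count ')' : Int)

def pvIsOp (c : Char) : Bool := c == '<' || c == '>' || c == '='

-- literal port of B: enumerate scan, first candidate with prefix balance 1
def find_predicate_alt_go (s : List Char) (i : Nat) : Option String × Int :=
  if h : i < s.length then
    if pvIsOp s[i] ∧ pvBal (s.take i) = 1 then
      match s[i + 1]? with
      | some '=' => (some (String.ofList [s[i], '=']), (i : Int))
      | _ => (some (String.ofList [s[i]]), (i : Int))
    else find_predicate_alt_go s (i + 1)
  else (none, -1)
termination_by s.length - i

def find_predicate_alt (string : String) : Option String × Int :=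
  find_predicate_alt_go string.toList 0

-- ===== PRECONDITION & SPEC =====
-- Pre_ excludes exactly the inputs where Python A (and Python B) raise IndexError:
-- the first '<'/'>'/'=' at paren depth 1 is the last character, so string[i+1] is out of range.
def Pre_find_predicate (string : String) : Prop :=
  ∀ i < string.toList.length,
    (i + 1 = string.toList.length ∧ pvIsOp (string.toList.getD i ' ') = true ∧ pvBal (string.toList.take i) = 1) →
    ∃ j < i, pvIsOp (string.toList.getD j ' ') = true ∧ pvBal (string.toList.take j) = 1
instance (string : String) : Decidable (Pre_find_predicate string) := by unfold Pre_find_predicate; infer_instance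

def pvWitness_find_predicate : String := "(a<b)"

def Spec_find_predicate (string : String) (out : Option String × Int) : Prop := out = find_predicate_alt string
instance (string : String) (out : Option String × Int) : Decidable (Spec_find_predicate string out) := by unfold Spec_find_predicate; infer_instance

-- ===== CLAIM (what is proved, stated in full; the proofs are below) =====
def Claim_equal_find_predicate : Prop := ∀ (string : String), Dom_find_predicate string → Pre_find_predicate string → Spec_find_predicate string (find_predicate string)

-- ===== LEMMAS AND PROOFS =====

theorem pvBal_take_succ (s : List Char) (i : Nat) (h : i < s.length) :
    (if s[i] = ')' then (if s[i] = '(' then pvBal (s.take i) + 1 else pvBal (s.take i)) - 1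
      else (if s[i] = '(' then pvBal (s.take i) + 1 else pvBal (s.take i)))
    = pvBal (s.take (i + 1)) := by
  have ht : s.take (i + 1) = s.take i ++ [s[i]] := by
    rw [List.take_add_one, List.getElem?_eq_getElem h]
    rfl
  rw [ht]
  simp only [pvBal, List.count_append, List.count_singleton]
  split_ifs with h1 h2 h2 <;> simp_all <;> ring

theorem go_eq (s : List Char) (i : Nat) :
    find_predicate_go s (pvBal (s.take i)) i = find_predicate_alt_go s i := by
  rw [find_predicate_go, find_predicate_alt_go]
  split
  · next h =>
    dsimp only
    rw [pvBal_take_succ s i h]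
    by_cases hop : s[i] = '<' ∨ s[i] = '>' ∨ s[i] = '='
    · have hne : pvBal (s.take (i + 1)) = pvBal (s.take i) := by
        rw [← pvBal_take_succ s i h]
        rcases hop with h1 | h1 | h1 <;> rw [h1] <;> simp
      have hops : pvIsOp s[i] = true := by
        rcases hop with h1 | h1 | h1 <;> simp [pvIsOp, h1]
      rw [hne]
      by_cases hb : pvBal (s.take i) = 1
      · rw [if_pos ⟨hb, hop⟩, if_pos ⟨hops, hb⟩]
      · rw [if_neg (fun hc => hb hc.1), if_neg (fun hc => hb hc.2), ← hne]
        exact go_eq s (i + 1)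
    · have hn : ¬ s[i] = '<' ∧ ¬ s[i] = '>' ∧ ¬ s[i] = '=' := by tauto
      have hops : pvIsOp s[i] = false := by
        simp [pvIsOp, hn.1, hn.2.1, hn.2.2]
      rw [if_neg (fun hc => hop hc.2), if_neg (by simp [hops])]
      exact go_eq s (i + 1)
  · rfl
termination_by s.length - i
decreasing_by all_goals omega

-- ===== VERDICT (by name: the statement is the Claim_ definition above) =====
theorem find_predicate_spec : Claim_equal_find_predicate := by
  intro string _ _
  show find_predicate string = find_predicate_alt string
  have := go_eq string.toList 0
  simpa [find_predicate, find_predicate_alt, pvBal] using this
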